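-- pv_equiv track=rewrite | github.com/dakoalbeik/spades-game-bot | tests/calculate_team_score.py | calculate_team_round_score
-- ===== SOURCE A (Python) =====
-- def calculate_team_round_score(bids, tricks_won):
--     round_scores = [0, 0]
--     round_bags = [0, 0]
--     nil = 0
--
--     for i in range(4):
--         # if player goes nil
--         team_mate = (i + 2) % 4
--         curr_score = i % 2
--         if bids[i] == nil:
--             if tricks_won[i] == 0:
--                 round_scores[curr_score] += 100
--             else:
--                 round_scores[curr_score] -= 100
--                 round_bags[curr_score] += tricks_won[i]
--         # if player bid, and the score for the team is getting set for the first time, or the teammate bid nil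
--         # (meaning the current score doesn't account for this current player's score)
--         elif round_scores[curr_score] == 0 or bids[team_mate] == nil:
--             team_target_bids = bids[i] + bids[team_mate]
--             team_trick_count = tricks_won[i] + tricks_won[team_mate]
--             if team_trick_count < team_target_bids:
--                 round_scores[curr_score] -= team_target_bids * 10
--             else:
--                 round_scores[curr_score] += team_target_bids * 10
--                 if bids[team_mate] == 0:
--                     round_bags[curr_score] += tricks_won[i] - bids[i]
--                 else:
--                     round_bags[curr_score] += team_trick_count - team_target_bids
--
--     return round_scores, round_bags
-- ===== SOURCE B (Python) =====
-- def calculate_team_round_score(bids, tricks_won):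
--     # Per-team decomposition: one pass over the two teams, scalar accumulators,
--     # team settlement computed exactly once per team.
--     scores = []
--     bags = []
--     for c in (0, 1):
--         ba, bb = bids[c], bids[c + 2]
--         ta, tb = tricks_won[c], tricks_won[c + 2]
--         s = 0
--         g = 0
--         for bid, tr in ((ba, ta), (bb, tb)):
--             if bid == 0:
--                 if tr == 0:
--                     s += 100
--                 else:
--                     s -= 100
--                     g += tr
--         if ba != 0 or bb != 0:
--             target = ba + bb
--             total = ta + tb
--             if total < target:
--                 s -= target * 10
--             else:
--                 s += target * 10
--                 if ba == 0:
--                     g += tb - bb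
--                 elif bb == 0:
--                     g += ta - ba
--                 else:
--                     g += total - target
--         scores.append(s)
--         bags.append(g)
--     return scores, bags
-- ===== Notes on version B (the rewrite author's own statement) =====
-- stated objective: simpler
-- what changed: B iterates over the 2 teams with scalar accumulators and settles each team exactly once, instead of A's loop over 4 players that mutates shared score/bag lists and re-enters the team settlement via a 'score is still 0' test.
-- intended difference: When a team's two players both bid non-nil with bids summing to 0 and the team took a positive number of tricks, A's accidental 'round_scores[team]==0' re-entry counts that team's bags twice (e.g. 6 instead of 3), while B settles the team once and returns the intended single bag count. — e.g. on calculate_team_round_score([1, 1, -1, 1], [2, 0, 1, 0]): A returns ([0, -20], [6, 0]), B returns ([0, -20], [3, 0])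
import Mathlib
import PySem

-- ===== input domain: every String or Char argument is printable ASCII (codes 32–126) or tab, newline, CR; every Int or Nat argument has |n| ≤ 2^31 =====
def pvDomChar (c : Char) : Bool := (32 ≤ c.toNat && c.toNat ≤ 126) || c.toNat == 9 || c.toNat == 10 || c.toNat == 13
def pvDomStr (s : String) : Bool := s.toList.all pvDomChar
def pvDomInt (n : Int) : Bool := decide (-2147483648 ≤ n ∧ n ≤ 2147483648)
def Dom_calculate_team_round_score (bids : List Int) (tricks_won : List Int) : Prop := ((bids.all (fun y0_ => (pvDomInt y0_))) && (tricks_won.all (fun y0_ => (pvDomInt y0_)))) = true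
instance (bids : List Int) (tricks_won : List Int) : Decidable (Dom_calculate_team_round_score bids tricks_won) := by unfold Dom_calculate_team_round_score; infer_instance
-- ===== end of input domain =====

-- B settles each team once in a 2-team loop with scalar accumulators (simpler decomposition);
-- A double-counts bags when a team's non-nil bids sum to 0 — stated as D_ below.

-- ===== PORT A =====
-- one iteration of A's 'for i in range(4)' body, state = (round_scores, round_bags)
def pyA_step (bids tricks_won : List Int) (st : List Int × List Int) (i : Int) : List Int × List Int :=
  let team_mate := PySem.Int.mod (i + 2) 4
  let curr := PySem.Int.mod i 2
  if PySem.List.pyGetD bids i 0 == 0 then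
    if PySem.List.pyGetD tricks_won i 0 == 0 then
      (PySem.List.pySetD st.1 curr (PySem.List.pyGetD st.1 curr 0 + 100), st.2)
    else
      (PySem.List.pySetD st.1 curr (PySem.List.pyGetD st.1 curr 0 - 100),
       PySem.List.pySetD st.2 curr (PySem.List.pyGetD st.2 curr 0 + PySem.List.pyGetD tricks_won i 0))
  else if PySem.List.pyGetD st.1 curr 0 == 0 || PySem.List.pyGetD bids team_mate 0 == 0 then
    let team_target_bids := PySem.List.pyGetD bids i 0 + PySem.List.pyGetD bids team_mate 0
    let team_trick_count := PySem.List.pyGetD tricks_won i 0 + PySem.List.pyGetD tricks_won team_mate 0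
    if team_trick_count < team_target_bids then
      (PySem.List.pySetD st.1 curr (PySem.List.pyGetD st.1 curr 0 - team_target_bids * 10), st.2)
    else
      let s' := PySem.List.pySetD st.1 curr (PySem.List.pyGetD st.1 curr 0 + team_target_bids * 10)
      if PySem.List.pyGetD bids team_mate 0 == 0 then
        (s', PySem.List.pySetD st.2 curr (PySem.List.pyGetD st.2 curr 0 + (PySem.List.pyGetD tricks_won i 0 - PySem.List.pyGetD bids i 0)))
      else
        (s', PySem.List.pySetD st.2 curr (PySem.List.pyGetD st.2 curr 0 + (team_trick_count - team_target_bids)))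
  else st

def calculate_team_round_score (bids : List Int) (tricks_won : List Int) : List Int × List Int :=
  (PySem.List.pyRange 0 4 1).foldl (pyA_step bids tricks_won) ([0, 0], [0, 0])

-- ===== PORT B =====
-- B's body for one team index c: returns (score, bags) for that team
def pyB_team (bids tricks_won : List Int) (c : Int) : Int × Int :=
  let ba := PySem.List.pyGetD bids c 0
  let bb := PySem.List.pyGetD bids (c + 2) 0
  let ta := PySem.List.pyGetD tricks_won c 0
  let tb := PySem.List.pyGetD tricks_won (c + 2) 0
  let sg := [(ba, ta), (bb, tb)].foldl (fun (p : Int × Int) q =>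
      if q.1 == 0 then
        if q.2 == 0 then (p.1 + 100, p.2) else (p.1 - 100, p.2 + q.2)
      else p) (0, 0)
  if ba != 0 || bb != 0 then
    let target := ba + bb
    let total := ta + tb
    if total < target then (sg.1 - target * 10, sg.2)
    else
      let s := sg.1 + target * 10
      if ba == 0 then (s, sg.2 + (tb - bb))
      else if bb == 0 then (s, sg.2 + (ta - ba))
      else (s, sg.2 + (total - target))
  else sg

def calculate_team_round_score_alt (bids : List Int) (tricks_won : List Int) : List Int × List Int :=
  [(0 : Int), 1].foldl
    (fun (st : List Int × List Int) c =>
      let sg := pyB_team bids tricks_won c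
      (st.1 ++ [sg.1], st.2 ++ [sg.2]))
    ([], [])

-- ===== PRECONDITION & SPEC =====
-- Pre_: A reads bids[0..3] and tricks_won[0..3] on every path, so shorter lists raise IndexError.
def Pre_calculate_team_round_score (bids : List Int) (tricks_won : List Int) : Prop :=
  4 ≤ bids.length ∧ 4 ≤ tricks_won.length
instance (bids : List Int) (tricks_won : List Int) : Decidable (Pre_calculate_team_round_score bids tricks_won) := by
  unfold Pre_calculate_team_round_score; infer_instance

def pvWitness_calculate_team_round_score : List Int × List Int := ([3, 0, 2, 1], [4, 0, 2, 1])

-- When a team's two players both bid non-nil with bids summing to 0 and the team took a positive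
-- number of tricks, A's accidental 'round_scores[team]==0' re-entry counts that team's bags twice,
-- while B settles the team once and returns the intended single bag count.
def D_calculate_team_round_score (bids : List Int) (tricks_won : List Int) : Prop :=
  (PySem.List.pyGetD bids 0 0 ≠ 0 ∧ PySem.List.pyGetD bids 2 0 ≠ 0 ∧
     PySem.List.pyGetD bids 0 0 + PySem.List.pyGetD bids 2 0 = 0 ∧
     0 < PySem.List.pyGetD tricks_won 0 0 + PySem.List.pyGetD tricks_won 2 0) ∨
  (PySem.List.pyGetD bids 1 0 ≠ 0 ∧ PySem.List.pyGetD bids 3 0 ≠ 0 ∧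
     PySem.List.pyGetD bids 1 0 + PySem.List.pyGetD bids 3 0 = 0 ∧
     0 < PySem.List.pyGetD tricks_won 1 0 + PySem.List.pyGetD tricks_won 3 0)
instance (bids : List Int) (tricks_won : List Int) : Decidable (D_calculate_team_round_score bids tricks_won) := by
  unfold D_calculate_team_round_score; infer_instance

def Spec_calculate_team_round_score (bids : List Int) (tricks_won : List Int) (out : List Int × List Int) : Prop :=
  ¬ D_calculate_team_round_score bids tricks_won → out = calculate_team_round_score_alt bids tricks_won
instance (bids : List Int) (tricks_won : List Int) (out : List Int × List Int) : Decidable (Spec_calculate_team_round_score bids tricks_won out) := by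
  unfold Spec_calculate_team_round_score; infer_instance

def pvDiffWitness_calculate_team_round_score : List Int × List Int := ([1, 1, -1, 1], [2, 0, 1, 0])
def pvDiffWitnessOut_calculate_team_round_score : (List Int × List Int) × (List Int × List Int) :=
  (([0, -20], [6, 0]), ([0, -20], [3, 0]))

-- ===== CLAIM (what is proved, stated in full; the proofs are below) =====
def Claim_unchanged_calculate_team_round_score : Prop := ∀ (bids : List Int) (tricks_won : List Int), Dom_calculate_team_round_score bids tricks_won → Pre_calculate_team_round_score bids tricks_won → Spec_calculate_team_round_score bids tricks_won (calculate_team_round_score bids tricks_won)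
def Claim_changed_calculate_team_round_score : Prop := Dom_calculate_team_round_score (pvDiffWitness_calculate_team_round_score.1) (pvDiffWitness_calculate_team_round_score.2) ∧ Pre_calculate_team_round_score (pvDiffWitness_calculate_team_round_score.1) (pvDiffWitness_calculate_team_round_score.2) ∧ D_calculate_team_round_score (pvDiffWitness_calculate_team_round_score.1) (pvDiffWitness_calculate_team_round_score.2) ∧ calculate_team_round_score (pvDiffWitness_calculate_team_round_score.1) (pvDiffWitness_calculate_team_round_score.2) = pvDiffWitnessOut_calculate_team_round_score.1 ∧ calculate_team_round_score_alt (pvDiffWitness_calculate_team_round_score.1) (pvDiffWitness_calculate_team_round_score.2) = pvDiffWitnessOut_calculate_team_round_score.2 ∧ pvDiffWitnessOut_calculate_team_round_score.1 ≠ pvDiffWitnessOut_calculate_team_round_score.2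
def Claim_exact_calculate_team_round_score : Prop := ∀ (bids : List Int) (tricks_won : List Int), Dom_calculate_team_round_score bids tricks_won → Pre_calculate_team_round_score bids tricks_won → D_calculate_team_round_score bids tricks_won → calculate_team_round_score bids tricks_won ≠ calculate_team_round_score_alt bids tricks_won

-- ===== LEMMAS AND PROOFS =====

-- A's per-player body on one team's scalars (score, bags); proof-side abstraction of pyA_step
def fA (ba bb ta tb : Int) (p : Int × Int) : Int × Int :=
  if ba = 0 then (if ta = 0 then (p.1 + 100, p.2) else (p.1 - 100, p.2 + ta))
  else if p.1 = 0 ∨ bb = 0 then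
    (if ta + tb < ba + bb then (p.1 - (ba + bb) * 10, p.2)
     else (p.1 + (ba + bb) * 10, p.2 + (if bb = 0 then ta - ba else ta + tb - (ba + bb))))
  else p

-- B's per-team body on scalars; proof-side abstraction of pyB_team
def gB (ba bb ta tb : Int) : Int × Int :=
  let s1 := if ba = 0 then (if ta = 0 then ((0:Int) + 100, (0:Int)) else (0 - 100, 0 + ta)) else (0, 0)
  let sg := if bb = 0 then (if tb = 0 then (s1.1 + 100, s1.2) else (s1.1 - 100, s1.2 + tb)) else s1
  if ba ≠ 0 ∨ bb ≠ 0 then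
    if ta + tb < ba + bb then (sg.1 - (ba + bb) * 10, sg.2)
    else if ba = 0 then (sg.1 + (ba + bb) * 10, sg.2 + (tb - bb))
    else if bb = 0 then (sg.1 + (ba + bb) * 10, sg.2 + (ta - ba))
    else (sg.1 + (ba + bb) * 10, sg.2 + (ta + tb - (ba + bb)))
  else sg

set_option maxHeartbeats 1600000 in
lemma stepA0 (b0 b1 b2 b3 t0 t1 t2 t3 : Int) (br tr : List Int) (s0 s1 g0 g1 : Int) :
    pyA_step (b0::b1::b2::b3::br) (t0::t1::t2::t3::tr) ([s0, s1], [g0, g1]) 0 =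
      ([(fA b0 b2 t0 t2 (s0, g0)).1, s1], [(fA b0 b2 t0 t2 (s0, g0)).2, g1]) := by
  have hss : ∀ v : Int, PySem.List.pySetD [s0, s1] (0:Int) v = [v, s1] := fun v => by
    rw [show (0:Int) = ((0:Nat):Int) from rfl, PySem.List.pySetD_natCast]; rfl
  have hsg : ∀ v : Int, PySem.List.pySetD [g0, g1] (0:Int) v = [v, g1] := fun v => by
    rw [show (0:Int) = ((0:Nat):Int) from rfl, PySem.List.pySetD_natCast]; rfl
  simp only [pyA_step, fA,
    show PySem.Int.mod (0+2) 4 = 2 from by decide,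
    show PySem.Int.mod 0 2 = 0 from by decide,
    PySem.List.pyGetD_ofNat', List.getD_cons_succ, List.getD_cons_zero,
    hss, hsg, beq_iff_eq, Bool.or_eq_true]
  split_ifs <;> rfl

set_option maxHeartbeats 1600000 in
lemma stepA1 (b0 b1 b2 b3 t0 t1 t2 t3 : Int) (br tr : List Int) (s0 s1 g0 g1 : Int) :
    pyA_step (b0::b1::b2::b3::br) (t0::t1::t2::t3::tr) ([s0, s1], [g0, g1]) 1 =
      ([s0, (fA b1 b3 t1 t3 (s1, g1)).1], [g0, (fA b1 b3 t1 t3 (s1, g1)).2]) := by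
  have hss : ∀ v : Int, PySem.List.pySetD [s0, s1] (1:Int) v = [s0, v] := fun v => by
    rw [show (1:Int) = ((1:Nat):Int) from rfl, PySem.List.pySetD_natCast]; rfl
  have hsg : ∀ v : Int, PySem.List.pySetD [g0, g1] (1:Int) v = [g0, v] := fun v => by
    rw [show (1:Int) = ((1:Nat):Int) from rfl, PySem.List.pySetD_natCast]; rfl
  simp only [pyA_step, fA,
    show PySem.Int.mod (1+2) 4 = 3 from by decide,
    show PySem.Int.mod 1 2 = 1 from by decide,
    PySem.List.pyGetD_ofNat', List.getD_cons_succ, List.getD_cons_zero,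
    hss, hsg, beq_iff_eq, Bool.or_eq_true]
  split_ifs <;> rfl

set_option maxHeartbeats 1600000 in
lemma stepA2 (b0 b1 b2 b3 t0 t1 t2 t3 : Int) (br tr : List Int) (s0 s1 g0 g1 : Int) :
    pyA_step (b0::b1::b2::b3::br) (t0::t1::t2::t3::tr) ([s0, s1], [g0, g1]) 2 =
      ([(fA b2 b0 t2 t0 (s0, g0)).1, s1], [(fA b2 b0 t2 t0 (s0, g0)).2, g1]) := by
  have hss : ∀ v : Int, PySem.List.pySetD [s0, s1] (0:Int) v = [v, s1] := fun v => by
    rw [show (0:Int) = ((0:Nat):Int) from rfl, PySem.List.pySetD_natCast]; rfl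
  have hsg : ∀ v : Int, PySem.List.pySetD [g0, g1] (0:Int) v = [v, g1] := fun v => by
    rw [show (0:Int) = ((0:Nat):Int) from rfl, PySem.List.pySetD_natCast]; rfl
  simp only [pyA_step, fA,
    show PySem.Int.mod (2+2) 4 = 0 from by decide,
    show PySem.Int.mod 2 2 = 0 from by decide,
    PySem.List.pyGetD_ofNat', List.getD_cons_succ, List.getD_cons_zero,
    hss, hsg, beq_iff_eq, Bool.or_eq_true]
  split_ifs <;> rfl

set_option maxHeartbeats 1600000 in
lemma stepA3 (b0 b1 b2 b3 t0 t1 t2 t3 : Int) (br tr : List Int) (s0 s1 g0 g1 : Int) :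
    pyA_step (b0::b1::b2::b3::br) (t0::t1::t2::t3::tr) ([s0, s1], [g0, g1]) 3 =
      ([s0, (fA b3 b1 t3 t1 (s1, g1)).1], [g0, (fA b3 b1 t3 t1 (s1, g1)).2]) := by
  have hss : ∀ v : Int, PySem.List.pySetD [s0, s1] (1:Int) v = [s0, v] := fun v => by
    rw [show (1:Int) = ((1:Nat):Int) from rfl, PySem.List.pySetD_natCast]; rfl
  have hsg : ∀ v : Int, PySem.List.pySetD [g0, g1] (1:Int) v = [g0, v] := fun v => by
    rw [show (1:Int) = ((1:Nat):Int) from rfl, PySem.List.pySetD_natCast]; rfl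
  simp only [pyA_step, fA,
    show PySem.Int.mod (3+2) 4 = 1 from by decide,
    show PySem.Int.mod 3 2 = 1 from by decide,
    PySem.List.pyGetD_ofNat', List.getD_cons_succ, List.getD_cons_zero,
    hss, hsg, beq_iff_eq, Bool.or_eq_true]
  split_ifs <;> rfl

lemma A_eval (b0 b1 b2 b3 t0 t1 t2 t3 : Int) (br tr : List Int) :
    calculate_team_round_score (b0::b1::b2::b3::br) (t0::t1::t2::t3::tr) =
      ([(fA b2 b0 t2 t0 (fA b0 b2 t0 t2 (0, 0))).1, (fA b3 b1 t3 t1 (fA b1 b3 t1 t3 (0, 0))).1],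
       [(fA b2 b0 t2 t0 (fA b0 b2 t0 t2 (0, 0))).2, (fA b3 b1 t3 t1 (fA b1 b3 t1 t3 (0, 0))).2]) := by
  rw [calculate_team_round_score, show PySem.List.pyRange 0 4 1 = [0,1,2,3] from by decide]
  simp only [List.foldl]
  rw [stepA0, stepA1, stepA2, stepA3]

lemma B_team0 (b0 b1 b2 b3 t0 t1 t2 t3 : Int) (br tr : List Int) :
    pyB_team (b0::b1::b2::b3::br) (t0::t1::t2::t3::tr) 0 = gB b0 b2 t0 t2 := by
  simp only [pyB_team, gB, List.foldl, show (0:Int)+2 = 2 from by decide,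
    PySem.List.pyGetD_ofNat', List.getD_cons_succ, List.getD_cons_zero,
    beq_iff_eq, bne_iff_ne, Bool.or_eq_true]

lemma B_team1 (b0 b1 b2 b3 t0 t1 t2 t3 : Int) (br tr : List Int) :
    pyB_team (b0::b1::b2::b3::br) (t0::t1::t2::t3::tr) 1 = gB b1 b3 t1 t3 := by
  simp only [pyB_team, gB, List.foldl, show (1:Int)+2 = 3 from by decide,
    PySem.List.pyGetD_ofNat', List.getD_cons_succ, List.getD_cons_zero,
    beq_iff_eq, bne_iff_ne, Bool.or_eq_true]

lemma B_eval (b0 b1 b2 b3 t0 t1 t2 t3 : Int) (br tr : List Int) :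
    calculate_team_round_score_alt (b0::b1::b2::b3::br) (t0::t1::t2::t3::tr) =
      ([(gB b0 b2 t0 t2).1, (gB b1 b3 t1 t3).1], [(gB b0 b2 t0 t2).2, (gB b1 b3 t1 t3).2]) := by
  simp only [calculate_team_round_score_alt, List.foldl]
  rw [B_team0, B_team1]
  simp

set_option maxHeartbeats 1600000 in
lemma team_eq (ba bb ta tb : Int) (h : ba ≠ 0 → bb ≠ 0 → ba + bb = 0 → ta + tb ≤ 0) :
    fA bb ba tb ta (fA ba bb ta tb (0, 0)) = gB ba bb ta tb := by
  by_cases h1 : ba = 0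
  · clear h
    simp only [fA, gB]
    split_ifs <;> simp_all <;> omega
  · by_cases h2 : bb = 0
    · clear h
      simp only [fA, gB]
      split_ifs <;> simp_all <;> omega
    · by_cases h3 : ba + bb = 0
      · have h4 := h h1 h2 h3
        clear h
        simp only [fA, gB]
        split_ifs <;> simp_all <;> omega
      · clear h
        simp only [fA, gB]
        split_ifs <;> simp_all

set_option maxHeartbeats 1600000 in
lemma team_diff (ba bb ta tb : Int) (h : ba ≠ 0 ∧ bb ≠ 0 ∧ ba + bb = 0 ∧ 0 < ta + tb) :
    (fA bb ba tb ta (fA ba bb ta tb (0, 0))).2 = (gB ba bb ta tb).2 + (ta + tb) := by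
  obtain ⟨h1, h2, h3, h4⟩ := h
  simp only [fA, gB]
  split_ifs <;> simp_all <;> omega

-- ===== VERDICT (by name: the statement is the Claim_ definition above) =====
theorem calculate_team_round_score_spec : Claim_unchanged_calculate_team_round_score := by
  intro bids tricks _ hPre hD
  obtain ⟨hb, ht⟩ := hPre
  match bids, tricks, hb, ht with
  | b0::b1::b2::b3::br, t0::t1::t2::t3::tr, _, _ =>
  simp only [D_calculate_team_round_score, pysem] at hD
  norm_num at hD
  obtain ⟨hD0, hD1⟩ := hD
  show calculate_team_round_score _ _ = calculate_team_round_score_alt _ _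
  rw [A_eval, B_eval, team_eq b0 b2 t0 t2 hD0, team_eq b1 b3 t1 t3 hD1]

theorem calculate_team_round_score_changed : Claim_changed_calculate_team_round_score := by
  unfold Claim_changed_calculate_team_round_score; decide

theorem calculate_team_round_score_tight : Claim_exact_calculate_team_round_score := by
  intro bids tricks _ hPre hD
  obtain ⟨hb, ht⟩ := hPre
  match bids, tricks, hb, ht with
  | b0::b1::b2::b3::br, t0::t1::t2::t3::tr, _, _ =>
  simp only [D_calculate_team_round_score, pysem] at hD
  norm_num at hD
  intro hEq
  rw [A_eval, B_eval] at hEq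
  simp only [Prod.mk.injEq, List.cons.injEq] at hEq
  rcases hD with h | h
  · have hd := team_diff b0 b2 t0 t2 ⟨h.1, h.2.1, h.2.2.1, by omega⟩
    have h4 := h.2.2.2
    rw [hEq.2.1] at hd
    omega
  · have hd := team_diff b1 b3 t1 t3 ⟨h.1, h.2.1, h.2.2.1, by omega⟩
    have h4 := h.2.2.2
    rw [hEq.2.2.1] at hd
    omega
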